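-- pv_equiv track=rewrite | github.com/jelambrar96-excersim/exercises | solutions/python/rectangles/1/rectangles.py | isrectangle
-- ===== SOURCE A (Python) =====
-- VERTICE_CHAR = '+'
--
-- H_CHAR = '-'
--
-- V_CHAR = '|'
--
-- def isrectangle(list_string):
--     if len(list_string) < 2:
--         return False
--     set_w = set(len(row) for row in list_string)
--     if len(set_w) > 1:
--         return False
--     w = set_w.pop()
--     if w < 2:
--         return False
--     if not list_string[0][0] == VERTICE_CHAR:
--         return False
--     if not list_string[0][-1] == VERTICE_CHAR:
--         return False
--     if not list_string[-1][0] == VERTICE_CHAR: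
--         return False
--     if not list_string[-1][-1] == VERTICE_CHAR:
--         return False
--     if not all(item in (H_CHAR, VERTICE_CHAR) for item in list_string[0][1:-1]):
--         return False
--     if not all(item in (H_CHAR, VERTICE_CHAR) for item in list_string[-1][1:-1]):
--         return False
--     if not all(item[0] in (V_CHAR, VERTICE_CHAR) for item in list_string[1:-1]):
--         return False
--     if not all(item[-1] in (V_CHAR, VERTICE_CHAR) for item in list_string[1:-1]):
--         return False
--     return True
-- ===== SOURCE B (Python) =====
-- VERTICE_CHAR = '+'
--
-- H_CHAR = '-'
--
-- V_CHAR = '|'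
--
--
-- def isrectangle(list_string):
--     h = len(list_string)
--     if h < 2:
--         return False
--     w = len(list_string[0])
--     if any(len(row) != w for row in list_string):
--         return False
--     if w < 2:
--         return False
--     for r, row in enumerate(list_string):
--         for c, ch in enumerate(row):
--             top_or_bottom = r == 0 or r == h - 1
--             left_or_right = c == 0 or c == w - 1
--             if top_or_bottom and left_or_right:
--                 if ch != VERTICE_CHAR:
--                     return False
--             elif top_or_bottom:
--                 if ch not in (H_CHAR, VERTICE_CHAR):
--                     return False
--             elif left_or_right:
--                 if ch not in (V_CHAR, VERTICE_CHAR):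
--                     return False
--     return True
-- ===== Notes on version B (the rewrite author's own statement) =====
-- stated objective: alternative
-- what changed: Replaced A's eight separate corner/edge passes (four corner indexings plus four slice scans) by one nested loop over (row, column) positions that derives each cell's constraint from whether its coordinates are extremal.
import Mathlib
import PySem

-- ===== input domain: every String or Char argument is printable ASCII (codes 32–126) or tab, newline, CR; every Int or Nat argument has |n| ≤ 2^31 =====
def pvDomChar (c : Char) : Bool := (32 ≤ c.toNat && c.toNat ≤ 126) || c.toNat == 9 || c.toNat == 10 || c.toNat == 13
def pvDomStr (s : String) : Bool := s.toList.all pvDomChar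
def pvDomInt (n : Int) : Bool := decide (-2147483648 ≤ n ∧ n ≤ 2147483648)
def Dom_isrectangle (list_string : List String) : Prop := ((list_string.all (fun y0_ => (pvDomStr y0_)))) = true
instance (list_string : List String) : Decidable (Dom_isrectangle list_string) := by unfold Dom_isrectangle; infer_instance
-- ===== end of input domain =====

-- B replaces A's eight separate corner/edge passes by one nested loop over (row, column)
-- positions that derives each cell's constraint from whether its coordinates are extremal
-- (alternative decomposition, same asymptotic cost).

-- ===== PORT A =====
-- item in ('-', '+')
def pvInHV (ch : Char) : Bool := ch == '-' || ch == '+'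
-- item in ('|', '+')
def pvInVV (ch : Char) : Bool := ch == '|' || ch == '+'

def isrectangle (list_string : List String) : Bool :=
  if PySem.List.len list_string < 2 then false else
  let set_w : PySem.Set Int := PySem.Set.ofList (list_string.map (fun row => PySem.Str.len row))
  if 1 < PySem.Set.len set_w then false else
  -- set_w.pop(): set_w has exactly one element here (nonempty list, len(set_w) ≤ 1), pop returns it
  let w : Int := set_w.headD 0
  if w < 2 then false else
  -- every indexing below is in range: len(list_string) ≥ 2 and every row has length w ≥ 2
  if !(PySem.List.pyGetD (PySem.List.pyGetD list_string 0 "").toList 0 ' ' == '+') then false else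
  if !(PySem.List.pyGetD (PySem.List.pyGetD list_string 0 "").toList (-1) ' ' == '+') then false else
  if !(PySem.List.pyGetD (PySem.List.pyGetD list_string (-1) "").toList 0 ' ' == '+') then false else
  if !(PySem.List.pyGetD (PySem.List.pyGetD list_string (-1) "").toList (-1) ' ' == '+') then false else
  if !((PySem.List.slice (PySem.List.pyGetD list_string 0 "").toList (some 1) (some (-1))).all pvInHV) then false else
  if !((PySem.List.slice (PySem.List.pyGetD list_string (-1) "").toList (some 1) (some (-1))).all pvInHV) then false else
  if !((PySem.List.slice list_string (some 1) (some (-1))).all (fun item => pvInVV (PySem.List.pyGetD item.toList 0 ' '))) then false else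
  if !((PySem.List.slice list_string (some 1) (some (-1))).all (fun item => pvInVV (PySem.List.pyGetD item.toList (-1) ' '))) then false else
  true

-- ===== PORT B =====
def pvCellOk (h w r c : Int) (ch : Char) : Bool :=
  let top_or_bottom := r == 0 || r == h - 1
  let left_or_right := c == 0 || c == w - 1
  if top_or_bottom && left_or_right then ch == '+'
  else if top_or_bottom then ch == '-' || ch == '+'
  else if left_or_right then ch == '|' || ch == '+'
  else true

def isrectangle_alt (list_string : List String) : Bool :=
  let h := PySem.List.len list_string
  if h < 2 then false else
  let w := PySem.Str.len (PySem.List.pyGetD list_string 0 "")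
  if list_string.any (fun row => !(PySem.Str.len row == w)) then false else
  if w < 2 then false else
  (PySem.List.enumerate list_string).all (fun rc =>
    (PySem.List.enumerate rc.2.toList).all (fun cc => pvCellOk h w rc.1 cc.1 cc.2))

-- ===== PRECONDITION & SPEC =====
def Spec_isrectangle (list_string : List String) (out : Bool) : Prop := out = isrectangle_alt list_string
instance (list_string : List String) (out : Bool) : Decidable (Spec_isrectangle list_string out) := by unfold Spec_isrectangle; infer_instance

-- ===== CLAIM (what is proved, stated in full; the proofs are below) =====
def Claim_equal_isrectangle : Prop := ∀ (list_string : List String), Dom_isrectangle list_string → Spec_isrectangle list_string (isrectangle list_string)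

-- ===== LEMMAS AND PROOFS =====

-- index-aware 'all' over enumerate collapses to a plain 'all' when the predicate is
-- index-independent on the actual (index, member) pairs
lemma all_enumerate_congr {α : Type} (p : Int × α → Bool) (q : α → Bool) (ms : List α) (s : Int)
    (hp : ∀ (k : Nat) (a : α), k < ms.length → a ∈ ms → p (s + (k : Int), a) = q a) :
    (PySem.List.enumerate ms s).all p = ms.all q := by
  induction ms generalizing s with
  | nil => rfl
  | cons x t ih =>
    rw [PySem.List.enumerate_cons]
    simp only [List.all_cons]
    have h0 := hp 0 x (by simp) (by simp)
    simp only [Nat.cast_zero, add_zero] at h0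
    rw [h0, ih (s + 1)]
    intro k a hk ha
    have := hp (k + 1) a (by simpa using Nat.succ_lt_succ hk) (List.mem_cons_of_mem _ ha)
    rw [← this]
    congr 1
    push_cast
    ring_nf

-- the set of row lengths has ≥ 2 elements iff some row length differs from the first
lemma set_len_ge_two_iff (x : Int) (xs : List Int) :
    1 < PySem.Set.len (PySem.Set.ofList (x :: xs)) ↔ ∃ y ∈ xs, y ≠ x := by
  rw [PySem.Set.ofList_cons]
  simp only [PySem.Set.len, List.length_cons, Nat.cast_add, Nat.cast_one, lt_add_iff_pos_left,
    Int.natCast_pos, ne_eq]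
  rw [List.length_pos_iff_exists_mem]
  constructor
  · rintro ⟨y, hy⟩
    rw [PySem.Set.mem_discard] at hy
    exact ⟨y, (PySem.Set.mem_ofList _ _).1 hy.1, hy.2⟩
  · rintro ⟨y, hy, hne⟩
    exact ⟨y, (PySem.Set.mem_discard _ _ _).2 ⟨(PySem.Set.mem_ofList _ _).2 hy, hne⟩⟩

-- xs[1:-1] is drop-first-and-last
lemma slice_one_neg_one {α : Type} (xs : List α) :
    PySem.List.slice xs (some 1) (some (-1)) = xs.tail.dropLast := by
  simp only [PySem.List.slice, PySem.List.clampIdx, Int.reduceNeg, Int.neg_neg_iff_pos,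
    zero_lt_one, ↓reduceIte, add_neg_lt_iff_lt_add, zero_add, Nat.cast_lt_one,
    List.length_eq_zero_iff, Int.reduceLT, Int.toNat_one]
  rcases xs with _ | ⟨x, t⟩
  · simp
  · simp only [List.tail_cons, reduceCtorEq]
    rw [List.dropLast_eq_take]
    simp

lemma cs_decomp {α : Type} (cs : List α) (hcs : 2 ≤ cs.length) : ∃ a ms b, cs = a :: ms ++ [b] := by
  rcases cs with _ | ⟨a, t⟩
  · simp at hcs
  · rcases t.eq_nil_or_concat with rfl | ⟨ms, b, rfl⟩
    · simp at hcs
    · exact ⟨a, ms, b, by simp [List.concat_eq_append]⟩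

-- B's cell loop over a top/bottom row equals A's two corner tests plus its interior scan
lemma row_edge (h w r : Int) (cs : List Char) (hcs : 2 ≤ cs.length)
    (hw : w = (cs.length : Int)) (hr : r = 0 ∨ r = h - 1) :
    (PySem.List.enumerate cs).all (fun cc => pvCellOk h w r cc.1 cc.2)
      = ((PySem.List.pyGetD cs 0 ' ' == '+')
         && ((PySem.List.slice cs (some 1) (some (-1))).all pvInHV
         && (PySem.List.pyGetD cs (-1) ' ' == '+'))) := by
  obtain ⟨a, ms, b, rfl⟩ := cs_decomp cs hcs
  have htb : (r == 0 || r == h - 1) = true := by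
    rcases hr with rfl | rfl <;> simp
  have hlen : w = (ms.length : Int) + 2 := by simp at hw; omega
  rw [show a :: ms ++ [b] = a :: (ms ++ [b]) from rfl]
  rw [PySem.List.enumerate_cons, PySem.List.enumerate_append, PySem.List.enumerate_cons]
  simp only [List.all_cons, List.all_append]
  have ha : pvCellOk h w r 0 a = (a == '+') := by
    simp [pvCellOk, htb]
  have hmid : (PySem.List.enumerate ms (0+1)).all (fun cc => pvCellOk h w r cc.1 cc.2)
      = ms.all pvInHV := by
    apply all_enumerate_congr
    intro k ch hk _
    have h0 : (1 + (k:Int) == 0) = false := by simp; omega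
    have h1 : (1 + (k:Int) == w - 1) = false := by simp; omega
    simp [pvCellOk, htb, h0, h1, pvInHV]
  have hb : pvCellOk h w r (0 + 1 + (ms.length : Int)) b = (b == '+') := by
    have h1 : 1 + (ms.length:Int) = w - 1 := by omega
    simp [pvCellOk, htb, h1]
  rw [ha, hmid, hb]
  rw [PySem.List.pyGetD_zero_cons, slice_one_neg_one,
      show a :: (ms ++ [b]) = (a :: ms) ++ [b] by simp,
      PySem.List.pyGetD_neg_one_append_singleton]
  simp [PySem.List.enumerate_nil]

-- B's cell loop over an interior row equals A's two border-column tests for that row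
lemma row_mid (h w r : Int) (cs : List Char) (hcs : 2 ≤ cs.length)
    (hw : w = (cs.length : Int)) (hr0 : r ≠ 0) (hr1 : r ≠ h - 1) :
    (PySem.List.enumerate cs).all (fun cc => pvCellOk h w r cc.1 cc.2)
      = (pvInVV (PySem.List.pyGetD cs 0 ' ') && pvInVV (PySem.List.pyGetD cs (-1) ' ')) := by
  obtain ⟨a, ms, b, rfl⟩ := cs_decomp cs hcs
  have htb : (r == 0 || r == h - 1) = false := by simp [hr0, hr1]
  have hlen : w = (ms.length : Int) + 2 := by simp at hw; omega
  rw [show a :: ms ++ [b] = a :: (ms ++ [b]) from rfl]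
  rw [PySem.List.enumerate_cons, PySem.List.enumerate_append, PySem.List.enumerate_cons]
  simp only [List.all_cons, List.all_append]
  have ha : pvCellOk h w r 0 a = pvInVV a := by
    simp [pvCellOk, htb, pvInVV]
  have hmid : (PySem.List.enumerate ms (0+1)).all (fun cc => pvCellOk h w r cc.1 cc.2)
      = ms.all (fun _ => true) := by
    apply all_enumerate_congr
    intro k ch hk _
    have h0 : (1 + (k:Int) == 0) = false := by simp; omega
    have h1 : (1 + (k:Int) == w - 1) = false := by simp; omega
    simp [pvCellOk, htb, h0, h1]
  have hb : pvCellOk h w r (0 + 1 + (ms.length : Int)) b = pvInVV b := by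
    have h1 : 1 + (ms.length:Int) = w - 1 := by omega
    simp [pvCellOk, htb, h1, pvInVV]
  rw [ha, hmid, hb]
  rw [PySem.List.pyGetD_zero_cons,
      show a :: (ms ++ [b]) = (a :: ms) ++ [b] by simp,
      PySem.List.pyGetD_neg_one_append_singleton]
  have hms : ms.all (fun _ : Char => true) = true := by simp
  simp [PySem.List.enumerate_nil, hms]

lemma all_and {α : Type} (l : List α) (p q : α → Bool) :
    (l.all fun a => p a && q a) = (l.all p && l.all q) := by
  induction l with
  | nil => rfl
  | cons a t ih => simp only [List.all_cons, ih]; cases p a <;> cases q a <;> simp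

lemma if_not_and (c r : Bool) : (if !c then false else r) = (c && r) := by
  cases c <;> simp

lemma main_eq (l : List String) : isrectangle l = isrectangle_alt l := by
  rcases l with _ | ⟨x, xs⟩
  · rfl
  rcases List.eq_nil_or_concat xs with rfl | ⟨ys, z, rfl⟩
  · -- a single row: both ports take the `len < 2` branch
    rfl
  rw [List.concat_eq_append]
  unfold isrectangle isrectangle_alt
  have hlen2 : ¬ (PySem.List.len (x :: (ys ++ [z])) < 2) := by
    simp [PySem.List.len]
  rw [if_neg hlen2, if_neg hlen2]
  simp only [PySem.List.pyGetD_zero_cons]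
  by_cases hset : ∃ row ∈ ys ++ [z], PySem.Str.len row ≠ PySem.Str.len x
  case neg =>
    have hA : ¬ (1 < PySem.Set.len (PySem.Set.ofList
        ((x :: (ys ++ [z])).map fun row => PySem.Str.len row))) := by
      rw [List.map_cons, set_len_ge_two_iff]
      rintro ⟨y, hy, hne⟩
      obtain ⟨row, hm, rfl⟩ := List.mem_map.1 hy
      exact hset ⟨row, hm, hne⟩
    rw [if_neg hA]
    have hB : ¬ (((x :: (ys ++ [z])).any
        (fun row => !(PySem.Str.len row == PySem.Str.len x))) = true) := by
      simp only [List.any_eq_true]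
      rintro ⟨row, hm, hne⟩
      rcases List.mem_cons.1 hm with rfl | hm'
      · simp at hne
      · exact hset ⟨row, hm', by simpa using hne⟩
    rw [if_neg hB]
    have hpop : (PySem.Set.ofList ((x :: (ys ++ [z])).map fun row => PySem.Str.len row)).headD 0
        = PySem.Str.len x := by
      rw [List.map_cons, PySem.Set.ofList_cons]; rfl
    rw [hpop]
    by_cases hw2 : PySem.Str.len x < 2
    · rw [if_pos hw2, if_pos hw2]
    rw [if_neg hw2, if_neg hw2]
    have hrowlen : ∀ row ∈ ys ++ [z], row.toList.length = x.toList.length := by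
      intro row hm
      by_contra hne
      exact hset ⟨row, hm, by simp only [PySem.Str.len_eq]; exact_mod_cast hne⟩
    have hxlen : 2 ≤ x.toList.length := by
      rw [PySem.Str.len_eq] at hw2; omega
    have hzlen : z.toList.length = x.toList.length := hrowlen z (by simp)
    have hW : PySem.Str.len x = (x.toList.length : Int) := PySem.Str.len_eq x
    rw [PySem.List.enumerate_cons, PySem.List.enumerate_append, PySem.List.enumerate_cons]
    simp only [List.all_cons, List.all_append, PySem.List.enumerate_nil, List.all_nil,
      Bool.and_true]
    have hlenl : PySem.List.len (x :: (ys ++ [z])) = (ys.length : Int) + 2 := by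
      simp [PySem.List.len]; ring
    have htoprow := row_edge (PySem.List.len (x :: (ys ++ [z]))) (PySem.Str.len x) 0
      x.toList hxlen hW (Or.inl rfl)
    have hbotrow := row_edge (PySem.List.len (x :: (ys ++ [z]))) (PySem.Str.len x)
      (0 + 1 + (ys.length : Int)) z.toList (by omega)
      (by rw [hW]; exact_mod_cast hzlen.symm)
      (Or.inr (by rw [hlenl]; ring))
    have hmidrows : (PySem.List.enumerate ys (0+1)).all
        (fun rc => (PySem.List.enumerate rc.2.toList).all
          (fun cc => pvCellOk (PySem.List.len (x :: (ys ++ [z]))) (PySem.Str.len x) rc.1 cc.1 cc.2))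
        = ys.all (fun row => pvInVV (PySem.List.pyGetD row.toList 0 ' ')
            && pvInVV (PySem.List.pyGetD row.toList (-1) ' ')) := by
      apply all_enumerate_congr
      intro k row hk hmem
      have hrl : row.toList.length = x.toList.length :=
        hrowlen row (List.mem_append_left _ hmem)
      exact row_mid (PySem.List.len (x :: (ys ++ [z]))) (PySem.Str.len x) (0 + 1 + (k : Int))
        row.toList (by omega) (by rw [hW]; exact_mod_cast hrl.symm)
        (by omega) (by rw [hlenl]; intro hcon; omega)
    rw [htoprow, hbotrow, hmidrows]
    have hlast : PySem.List.pyGetD (x :: (ys ++ [z])) (-1) "" = z := by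
      rw [show x :: (ys ++ [z]) = (x :: ys) ++ [z] by simp,
        PySem.List.pyGetD_neg_one_append_singleton]
    have hslice : PySem.List.slice (x :: (ys ++ [z])) (some 1) (some (-1)) = ys := by
      rw [slice_one_neg_one]; simp
    rw [hlast, hslice, if_not_and, if_not_and, if_not_and, if_not_and, if_not_and,
      if_not_and, if_not_and, if_not_and]
    rw [show ((ys.all fun item => pvInVV (PySem.List.pyGetD item.toList 0 ' '))
        && ((ys.all fun item => pvInVV (PySem.List.pyGetD item.toList (-1) ' ')) && true))
      = ys.all (fun row => pvInVV (PySem.List.pyGetD row.toList 0 ' ')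
          && pvInVV (PySem.List.pyGetD row.toList (-1) ' ')) by
        rw [all_and]; simp]
    rw [Bool.eq_iff_iff]
    simp only [Bool.and_eq_true]
    tauto
  case pos =>
    have hA : 1 < PySem.Set.len (PySem.Set.ofList
        ((x :: (ys ++ [z])).map fun row => PySem.Str.len row)) := by
      rw [List.map_cons, set_len_ge_two_iff]
      obtain ⟨row, hm, hne⟩ := hset
      exact ⟨PySem.Str.len row, List.mem_map_of_mem hm, hne⟩
    have hB : ((x :: (ys ++ [z])).any
        (fun row => !(PySem.Str.len row == PySem.Str.len x))) = true := by
      obtain ⟨row, hm, hne⟩ := hset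
      simp only [List.any_eq_true]
      exact ⟨row, List.mem_cons_of_mem _ hm, by simpa using hne⟩
    rw [if_pos hA, if_pos hB]

-- ===== VERDICT (by name: the statement is the Claim_ definition above) =====
theorem isrectangle_spec : Claim_equal_isrectangle := by
  intro l _
  unfold Spec_isrectangle
  exact main_eq l
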